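-- pv_equiv track=rewrite | github.com/villanuevaeliusis25-lang/New_Learing_Python | Practicas/Ejercicios_4.py | generar_secuencia
-- ===== SOURCE A (Python) =====
-- def generar_secuencia(inicio, fin, paso=1):
--     """Genera una lista de números desde inicio hasta fin
--     Paso controla de cuánto en cuánto va """
--     secuencia = []
--     if paso > 0:
--         while inicio <= fin:
--             secuencia.append(inicio)
--             inicio = inicio + paso
--     elif paso < 0:
--         while inicio >= fin:
--             secuencia.append(inicio)
--             inicio = inicio + paso
--     else:
--         return "Error, no se puede poner 0"
--
--     return secuencia
-- ===== SOURCE B (Python) =====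
-- def generar_secuencia(inicio, fin, paso=1):
--     """Genera una lista de numeros desde inicio hasta fin (paso controla el salto)."""
--     if paso == 0:
--         return "Error, no se puede poner 0"
--     n = max(0, (fin - inicio) // paso + 1)
--     return [inicio + i * paso for i in range(n)]
-- ===== Notes on version B (the rewrite author's own statement) =====
-- stated objective: faster
-- what changed: The while-loop with repeated addition and append is replaced by a closed-form count n = max(0,(fin-inicio)//paso+1) and a single comprehension inicio+i*paso over range(n), one branch for both signs of paso.
-- outside the precondition, e.g. on generar_secuencia(1, 5, 0): A returns 'Error, no se puede poner 0', B returns 'Error, no se puede poner 0'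
import Mathlib
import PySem

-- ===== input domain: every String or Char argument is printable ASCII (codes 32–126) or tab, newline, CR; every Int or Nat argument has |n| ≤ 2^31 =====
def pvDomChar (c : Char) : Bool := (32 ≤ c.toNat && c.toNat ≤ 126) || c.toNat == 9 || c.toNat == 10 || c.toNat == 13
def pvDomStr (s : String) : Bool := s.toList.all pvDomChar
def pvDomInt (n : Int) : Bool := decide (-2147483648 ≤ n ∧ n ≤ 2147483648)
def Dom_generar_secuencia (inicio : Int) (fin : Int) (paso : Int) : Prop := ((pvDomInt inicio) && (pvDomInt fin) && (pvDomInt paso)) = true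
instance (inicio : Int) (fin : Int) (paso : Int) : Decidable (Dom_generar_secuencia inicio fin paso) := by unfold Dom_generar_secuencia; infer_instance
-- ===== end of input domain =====

-- B replaces A's while-loop of repeated additions by a closed-form element count
-- and a single map over range (objective: different algorithm, simpler control flow).

-- ===== PORT A =====
-- A's 'while inicio <= fin' loop for paso > 0 (append, then inicio = inicio + paso)
def pvUpLoop (fin paso : Int) (hp : 0 < paso) (inicio : Int) : List Int :=
  if inicio ≤ fin then inicio :: pvUpLoop fin paso hp (inicio + paso) else []
termination_by (fin + paso - inicio).toNat
decreasing_by omega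

-- A's 'while inicio >= fin' loop for paso < 0
def pvDownLoop (fin paso : Int) (hp : paso < 0) (inicio : Int) : List Int :=
  if fin ≤ inicio then inicio :: pvDownLoop fin paso hp (inicio + paso) else []
termination_by (inicio - fin - paso).toNat
decreasing_by omega

def generar_secuencia (inicio : Int) (fin : Int) (paso : Int) : List Int :=
  if hp : 0 < paso then pvUpLoop fin paso hp inicio
  else if hn : paso < 0 then pvDownLoop fin paso hn inicio
  else []  -- paso = 0: Python A returns a string here, not a list; excluded by Pre_

-- ===== PORT B =====
def generar_secuencia_alt (inicio : Int) (fin : Int) (paso : Int) : List Int :=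
  -- n = max(0, (fin - inicio) // paso + 1); [inicio + i * paso for i in range(n)]
  let n : Int := max 0 (PySem.Int.floordiv (fin - inicio) paso + 1)
  (List.range n.toNat).map (fun i : Nat => inicio + (i : Int) * paso)

-- ===== PRECONDITION & SPEC =====
-- Pre_ excludes paso = 0, where A returns the string "Error, no se puede poner 0" instead of a list of ints.
def Pre_generar_secuencia (inicio : Int) (fin : Int) (paso : Int) : Prop := paso ≠ 0
instance (inicio : Int) (fin : Int) (paso : Int) : Decidable (Pre_generar_secuencia inicio fin paso) := by unfold Pre_generar_secuencia; infer_instance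
def pvWitness_generar_secuencia : Int × Int × Int := (1, 5, 2)

def Spec_generar_secuencia (inicio : Int) (fin : Int) (paso : Int) (out : List Int) : Prop := out = generar_secuencia_alt inicio fin paso
instance (inicio : Int) (fin : Int) (paso : Int) (out : List Int) : Decidable (Spec_generar_secuencia inicio fin paso out) := by unfold Spec_generar_secuencia; infer_instance

-- ===== CLAIM (what is proved, stated in full; the proofs are below) =====
def Claim_equal_generar_secuencia : Prop := ∀ (inicio : Int) (fin : Int) (paso : Int), Dom_generar_secuencia inicio fin paso → Pre_generar_secuencia inicio fin paso → Spec_generar_secuencia inicio fin paso (generar_secuencia inicio fin paso)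

-- ===== LEMMAS AND PROOFS =====

-- the arithmetic sequence [inicio + i*paso for i in range n]
def pvSeq (inicio paso : Int) (n : Nat) : List Int :=
  (List.range n).map (fun i : Nat => inicio + (i : Int) * paso)

theorem pvSeq_succ (inicio paso : Int) (k : Nat) :
    pvSeq inicio paso (k + 1) = inicio :: pvSeq (inicio + paso) paso k := by
  unfold pvSeq
  rw [List.range_succ_eq_map, List.map_cons, List.map_map]
  refine congrArg₂ _ (by simp) ?_
  apply List.map_congr_left
  intro i _
  simp [Function.comp]
  ring

theorem pv_bracket (x b : Int) (hb : 0 < b) :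
    PySem.Int.floordiv x b * b ≤ x ∧ x < (PySem.Int.floordiv x b + 1) * b :=
  (PySem.Int.floordiv_eq_iff_of_pos hb).mp rfl

theorem pv_shift (x b : Int) (hb : 0 < b) :
    PySem.Int.floordiv (x - b) b = PySem.Int.floordiv x b - 1 := by
  obtain ⟨h1, h2⟩ := pv_bracket x b hb
  exact (PySem.Int.floordiv_eq_iff_of_pos hb).mpr ⟨by nlinarith, by nlinarith⟩

theorem pv_nonneg (x b : Int) (hb : 0 < b) (hx : 0 ≤ x) :
    0 ≤ PySem.Int.floordiv x b := by
  obtain ⟨h1, h2⟩ := pv_bracket x b hb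
  nlinarith

theorem pv_neg (x b : Int) (hb : 0 < b) (hx : x < 0) :
    PySem.Int.floordiv x b < 0 := by
  obtain ⟨h1, h2⟩ := pv_bracket x b hb
  nlinarith

theorem pv_up_eq (fin paso : Int) (hp : 0 < paso) (inicio : Int) :
    pvUpLoop fin paso hp inicio =
      pvSeq inicio paso (max 0 (PySem.Int.floordiv (fin - inicio) paso + 1)).toNat := by
  fun_induction pvUpLoop fin paso hp inicio with
  | case1 inicio hle ih =>
    have h0 : 0 ≤ PySem.Int.floordiv (fin - inicio) paso :=
      pv_nonneg _ _ hp (by omega)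
    have hshift : PySem.Int.floordiv (fin - (inicio + paso)) paso
        = PySem.Int.floordiv (fin - inicio) paso - 1 := by
      rw [show fin - (inicio + paso) = (fin - inicio) - paso by ring]
      exact pv_shift _ _ hp
    have hk : (max 0 (PySem.Int.floordiv (fin - inicio) paso + 1)).toNat
        = (max 0 (PySem.Int.floordiv (fin - inicio) paso - 1 + 1)).toNat + 1 := by omega
    rw [ih, hshift, hk, pvSeq_succ]
  | case2 inicio hle =>
    have hneg : PySem.Int.floordiv (fin - inicio) paso < 0 :=
      pv_neg _ _ hp (by omega)
    have hz : (max 0 (PySem.Int.floordiv (fin - inicio) paso + 1)).toNat = 0 := by omega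
    simp [hz, pvSeq]

theorem pv_flip (x b : Int) :
    PySem.Int.floordiv x b = PySem.Int.floordiv (-x) (-b) := by
  have := PySem.Int.floordiv_neg_neg (a := -x) (b := -b)
  simp only [neg_neg] at this
  exact this

theorem pv_down_eq (fin paso : Int) (hp : paso < 0) (inicio : Int) :
    pvDownLoop fin paso hp inicio =
      pvSeq inicio paso (max 0 (PySem.Int.floordiv (fin - inicio) paso + 1)).toNat := by
  fun_induction pvDownLoop fin paso hp inicio with
  | case1 inicio hle ih =>
    have h0 : 0 ≤ PySem.Int.floordiv (fin - inicio) paso := by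
      rw [pv_flip]
      exact pv_nonneg _ _ (by omega) (by omega)
    have hshift : PySem.Int.floordiv (fin - (inicio + paso)) paso
        = PySem.Int.floordiv (fin - inicio) paso - 1 := by
      rw [pv_flip, pv_flip (fin - inicio) paso,
        show -(fin - (inicio + paso)) = (-(fin - inicio)) - (-paso) by ring]
      exact pv_shift _ _ (by omega)
    have hk : (max 0 (PySem.Int.floordiv (fin - inicio) paso + 1)).toNat
        = (max 0 (PySem.Int.floordiv (fin - inicio) paso - 1 + 1)).toNat + 1 := by omega
    rw [ih, hshift, hk, pvSeq_succ]
  | case2 inicio hle =>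
    have hneg : PySem.Int.floordiv (fin - inicio) paso < 0 := by
      rw [pv_flip]
      exact pv_neg _ _ (by omega) (by omega)
    have hz : (max 0 (PySem.Int.floordiv (fin - inicio) paso + 1)).toNat = 0 := by omega
    simp [hz, pvSeq]

theorem pv_alt_eq (inicio fin paso : Int) :
    generar_secuencia_alt inicio fin paso =
      pvSeq inicio paso (max 0 (PySem.Int.floordiv (fin - inicio) paso + 1)).toNat := rfl

-- ===== VERDICT (by name: the statement is the Claim_ definition above) =====
theorem generar_secuencia_spec : Claim_equal_generar_secuencia := by
  intro inicio fin paso _hdom hpre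
  unfold Spec_generar_secuencia generar_secuencia
  rw [pv_alt_eq]
  split_ifs with hp hn
  · exact pv_up_eq fin paso hp inicio
  · exact pv_down_eq fin paso hn inicio
  · exact absurd (by omega) hpre
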